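-- pv_equiv track=rewrite | github.com/Xujiahui21/Soft-CHO | controller/Benchmark/Packet_Loss_Rate_analyse.py | Handle_seperate_PLR
-- ===== SOURCE A (Python) =====
-- def Handle_seperate_PLR(Delay,seperation,timestamp):
--     PLR_count = []
--     for i in range(len(seperation)-1):
--         packet_count = 0
--         for j in range(len(Delay[3])):
--             if timestamp[j]>= seperation[i] and timestamp[j] <= seperation[i+1]: #+ 100: #start from connect or last HO to 100ms after HO
--                 if Delay[3][j] == -100:
--                     packet_count = packet_count +1
--         PLR_count.append(packet_count)
--
--     return PLR_count
-- ===== SOURCE B (Python) =====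
-- def Handle_seperate_PLR(Delay, seperation, timestamp):
--     # Fewer than two separation points: no intervals to count.
--     if len(seperation) < 2:
--         return []
--     # Sort the loss-marked timestamps once; answer each interval with two binary searches.
--     losses = sorted(t for t, d in zip(timestamp, Delay[3]) if d == -100)
--
--     def count_below(x, strict):
--         # number of elements of `losses` that are < x (strict) resp. <= x (not strict)
--         lo, hi = 0, len(losses)
--         while lo < hi:
--             mid = (lo + hi) // 2
--             if losses[mid] < x or (not strict and losses[mid] == x):
--                 lo = mid + 1
--             else:
--                 hi = mid
--         return lo
--
--     return [max(0, count_below(seperation[i + 1], False) - count_below(seperation[i], True))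
--             for i in range(len(seperation) - 1)]
-- ===== Notes on version B (the rewrite author's own statement) =====
-- stated objective: faster
-- what changed: B sorts the loss-marked timestamps once and answers each interval with two hand-written binary searches (count of elements < lo, count <= hi), instead of A's nested loops rescanning every packet for every interval; B also short-circuits to [] when there are fewer than two separation points, matching A.
import Mathlib
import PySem

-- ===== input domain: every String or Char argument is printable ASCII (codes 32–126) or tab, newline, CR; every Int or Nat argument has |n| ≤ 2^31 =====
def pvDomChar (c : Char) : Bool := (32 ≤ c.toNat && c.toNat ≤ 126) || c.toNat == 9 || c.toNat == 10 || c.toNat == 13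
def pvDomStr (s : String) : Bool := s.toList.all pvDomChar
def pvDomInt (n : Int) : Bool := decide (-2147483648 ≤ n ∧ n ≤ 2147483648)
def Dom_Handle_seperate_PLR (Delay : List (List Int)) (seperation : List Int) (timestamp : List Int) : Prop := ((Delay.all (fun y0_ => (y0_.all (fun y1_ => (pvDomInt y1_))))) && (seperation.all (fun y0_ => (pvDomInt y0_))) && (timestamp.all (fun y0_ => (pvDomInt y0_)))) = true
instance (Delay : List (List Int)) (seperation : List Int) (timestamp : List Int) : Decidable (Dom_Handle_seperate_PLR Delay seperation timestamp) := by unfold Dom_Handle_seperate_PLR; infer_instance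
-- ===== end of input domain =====

-- B sorts the loss-marked timestamps once and answers each interval with two binary
-- searches (count of elements < lo resp. <= hi), replacing A's per-interval rescan of
-- every packet.


-- ===== PORT A =====
def Handle_seperate_PLR (Delay : List (List Int)) (seperation : List Int) (timestamp : List Int) : List Int :=
  (PySem.List.pyRange 0 ((seperation.length : Int) - 1) 1).foldl
    (fun PLR_count i =>
      PLR_count ++
        [(PySem.List.pyRange 0 (((PySem.List.pyGetD Delay 3 []).length : Int)) 1).foldl
          (fun packet_count j =>
            if PySem.List.pyGetD timestamp j 0 ≥ PySem.List.pyGetD seperation i 0 ∧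
               PySem.List.pyGetD timestamp j 0 ≤ PySem.List.pyGetD seperation (i + 1) 0 then
              if PySem.List.pyGetD (PySem.List.pyGetD Delay 3 []) j 0 = -100 then
                packet_count + 1
              else packet_count
            else packet_count)
          0])
    []

-- ===== PORT B =====
-- hand-written binary search from Source B: number of elements of `losses` (sorted) that are
-- < x (strict) resp. <= x (not strict); the while-loop runs on a fuel counter hi - lo,
-- which only makes the same computation total (each iteration shrinks hi - lo by >= 1)
def pvCountBelowGo (losses : List Int) (x : Int) (strict : Bool) : Nat → Nat → Nat → Nat
  | 0, lo, _ => lo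
  | fuel + 1, lo, hi =>
    if lo < hi then
      let mid := (lo + hi) / 2
      if losses.getD mid 0 < x ∨ (strict = false ∧ losses.getD mid 0 = x) then
        pvCountBelowGo losses x strict fuel (mid + 1) hi
      else
        pvCountBelowGo losses x strict fuel lo mid
    else lo

def pvCountBelow (losses : List Int) (x : Int) (strict : Bool) : Nat :=
  pvCountBelowGo losses x strict losses.length 0 losses.length

def Handle_seperate_PLR_alt (Delay : List (List Int)) (seperation : List Int) (timestamp : List Int) : List Int :=
  if seperation.length < 2 then []
  else
    let losses := PySem.List.sorted
      (((timestamp.zip (PySem.List.pyGetD Delay 3 [])).filter (fun p => p.2 == -100)).map Prod.fst)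
      (fun x => x) false
    (PySem.List.pyRange 0 ((seperation.length : Int) - 1) 1).map
      (fun i =>
        max 0 ((pvCountBelow losses (PySem.List.pyGetD seperation (i + 1) 0) false : Int)
              - (pvCountBelow losses (PySem.List.pyGetD seperation i 0) true : Int)))

-- ===== PRECONDITION & SPEC =====
-- Pre_ excludes exactly the inputs on which A raises IndexError: with at least two
-- separation points A indexes Delay[3] (needs >= 4 rows) and timestamp[j] for every
-- j < len(Delay[3]) (needs timestamp at least that long); with <= 1 separation A returns [].
def Pre_Handle_seperate_PLR (Delay : List (List Int)) (seperation : List Int) (timestamp : List Int) : Prop :=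
  seperation.length ≤ 1 ∨ (4 ≤ Delay.length ∧ (Delay.getD 3 []).length ≤ timestamp.length)
instance (Delay : List (List Int)) (seperation : List Int) (timestamp : List Int) : Decidable (Pre_Handle_seperate_PLR Delay seperation timestamp) := by unfold Pre_Handle_seperate_PLR; infer_instance
def pvWitness_Handle_seperate_PLR : List (List Int) × List Int × List Int :=
  ([[], [], [], [1, -100]], [0, 5, 10], [1, 7])

def Spec_Handle_seperate_PLR (Delay : List (List Int)) (seperation : List Int) (timestamp : List Int) (out : List Int) : Prop := out = Handle_seperate_PLR_alt Delay seperation timestamp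
instance (Delay : List (List Int)) (seperation : List Int) (timestamp : List Int) (out : List Int) : Decidable (Spec_Handle_seperate_PLR Delay seperation timestamp out) := by unfold Spec_Handle_seperate_PLR; infer_instance

-- ===== CLAIM (what is proved, stated in full; the proofs are below) =====
def Claim_equal_Handle_seperate_PLR : Prop := ∀ (Delay : List (List Int)) (seperation : List Int) (timestamp : List Int), Dom_Handle_seperate_PLR Delay seperation timestamp → Pre_Handle_seperate_PLR Delay seperation timestamp → Spec_Handle_seperate_PLR Delay seperation timestamp (Handle_seperate_PLR Delay seperation timestamp)

-- ===== LEMMAS AND PROOFS =====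

-- the predicate pvCountBelow counts: v < x (strict) resp. v <= x (non-strict)
def pvBelow (x : Int) (strict : Bool) (v : Int) : Bool :=
  if strict then decide (v < x) else decide (v ≤ x)

lemma pvBelow_mono (x : Int) (strict : Bool) {v w : Int} (h : v ≤ w)
    (hw : pvBelow x strict w = true) : pvBelow x strict v = true := by
  cases strict <;> simp [pvBelow] at * <;> omega

lemma cond_iff_below (x : Int) (strict : Bool) (v : Int) :
    (v < x ∨ (strict = false ∧ v = x)) ↔ pvBelow x strict v = true := by
  cases strict <;> simp [pvBelow] <;> omega

lemma sorted_getD_mono {l : List Int} (hs : l.Pairwise (· ≤ ·)) {i j : Nat}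
    (hij : i ≤ j) (hj : j < l.length) : l.getD i 0 ≤ l.getD j 0 := by
  rcases Nat.lt_or_ge i j with h | h
  · rw [List.getD_eq_getElem _ _ (by omega), List.getD_eq_getElem _ _ hj]
    exact (List.pairwise_iff_getElem.mp hs) i j (by omega) hj h
  · have : i = j := by omega
    subst this; exact le_refl _

-- the binary search returns a split point: below it the predicate holds, at/after it not
lemma pvCountBelowGo_char (l : List Int) (x : Int) (strict : Bool)
    (hs : l.Pairwise (· ≤ ·)) :
    ∀ (fuel lo hi : Nat), hi - lo ≤ fuel → lo ≤ hi → hi ≤ l.length →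
      (∀ i, i < lo → i < l.length → pvBelow x strict (l.getD i 0) = true) →
      (∀ i, hi ≤ i → i < l.length → pvBelow x strict (l.getD i 0) = false) →
      pvCountBelowGo l x strict fuel lo hi ≤ l.length ∧
      ∀ i, i < l.length →
        (pvBelow x strict (l.getD i 0) = true ↔ i < pvCountBelowGo l x strict fuel lo hi) := by
  intro fuel
  induction fuel with
  | zero =>
    intro lo hi hf hle hhi hL hR
    have hlohi : lo = hi := by omega
    subst hlohi
    simp only [pvCountBelowGo]
    refine ⟨by omega, ?_⟩
    intro i hilen
    constructor
    · intro h
      by_contra hc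
      have := hR i (by omega) hilen
      rw [h] at this; exact absurd this (by simp)
    · intro h; exact hL i h hilen
  | succ fuel ih =>
    intro lo hi hf hle hhi hL hR
    by_cases hlt : lo < hi
    · simp only [pvCountBelowGo, if_pos hlt]
      by_cases hcond : (l.getD ((lo + hi) / 2) 0 < x ∨ (strict = false ∧ l.getD ((lo + hi) / 2) 0 = x))
      · rw [if_pos hcond]
        apply ih ((lo + hi) / 2 + 1) hi (by omega) (by omega) hhi ?_ hR
        intro i h1 h2
        exact pvBelow_mono x strict (sorted_getD_mono hs (by omega) (by omega))
          ((cond_iff_below x strict _).mp hcond)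
      · rw [if_neg hcond]
        apply ih lo ((lo + hi) / 2) (by omega) (by omega) (by omega) hL ?_
        intro i h1 h2
        by_cases hb : pvBelow x strict (l.getD i 0) = true
        · exact absurd ((cond_iff_below x strict _).mpr
            (pvBelow_mono x strict (sorted_getD_mono hs h1 h2) hb)) hcond
        · simpa using hb
    · simp only [pvCountBelowGo, if_neg hlt]
      have hlohi : lo = hi := by omega
      refine ⟨by omega, ?_⟩
      intro i hilen
      constructor
      · intro h
        by_contra hc
        have := hR i (by omega) hilen
        rw [h] at this; exact absurd this (by simp)
      · intro h; exact hL i h hilen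

-- countP over the index range equals countP over the list itself
lemma countP_range_getD {α : Type} (l : List α) (d : α) (p : α → Bool) :
    (List.range l.length).countP (fun j => p (l.getD j d)) = l.countP p := by
  induction l with
  | nil => simp
  | cons x xs ih =>
    simp only [List.length_cons, List.range_succ_eq_map, List.countP_cons, List.countP_map]
    simp only [List.getD_cons_zero, List.getD_cons_succ, Function.comp_def, Nat.succ_eq_add_one]
    rw [ih]

lemma countP_range_lt (p n : Nat) :
    (List.range n).countP (fun i => decide (i < p)) = min p n := by
  induction n with
  | zero => simp
  | succ n ih =>
    rw [List.range_succ, List.countP_append, ih]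
    by_cases h : n < p <;> simp [h] <;> omega

-- on a sorted list, the binary search computes countP of its predicate
lemma pvCountBelow_eq_countP (l : List Int) (x : Int) (strict : Bool)
    (hs : l.Pairwise (· ≤ ·)) :
    pvCountBelow l x strict = l.countP (pvBelow x strict) := by
  obtain ⟨hle, hiff⟩ := pvCountBelowGo_char l x strict hs l.length 0 l.length (by omega)
    (by omega) (le_refl _) (by intro i h1 _; omega) (by intro i h1 h2; omega)
  unfold pvCountBelow
  rw [← countP_range_getD l 0 (pvBelow x strict)]
  have h2 : (List.range l.length).countP (fun j => pvBelow x strict (l.getD j 0))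
      = (List.range l.length).countP (fun j => decide (j < pvCountBelowGo l x strict l.length 0 l.length)) := by
    apply List.countP_congr
    intro i hi
    rw [List.mem_range] at hi
    constructor
    · intro h; simpa using (hiff i hi).mp (by simpa using h)
    · intro h; simpa using (hiff i hi).mpr (by simpa using h)
  rw [h2, countP_range_lt]
  omega

-- counting in [a,b] from the two one-sided counts
lemma count_split (l : List Int) (a b : Int) (h : a ≤ b) :
    l.countP (fun t => decide (t ≤ b))
      = l.countP (fun t => decide (t < a))
        + l.countP (fun t => decide (a ≤ t) && decide (t ≤ b)) := by
  induction l with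
  | nil => simp
  | cons t ts ih =>
    simp only [List.countP_cons, ih]
    by_cases h1 : t < a
    · have h3 : ¬ a ≤ t := by omega
      have h2 : t ≤ b := by omega
      simp [h1, h2, h3]; omega
    · have h3 : a ≤ t := by omega
      by_cases h2 : t ≤ b <;> simp [h1, h2, h3] <;> omega

lemma max_counts (l : List Int) (a b : Int) :
    max 0 ((l.countP (fun t => decide (t ≤ b)) : Int) - l.countP (fun t => decide (t < a)))
      = (l.countP (fun t => decide (a ≤ t) && decide (t ≤ b)) : Int) := by
  by_cases h : a ≤ b
  · rw [count_split l a b h]; push_cast; omega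
  · have h0 : l.countP (fun t => decide (a ≤ t) && decide (t ≤ b)) = 0 := by
      rw [List.countP_eq_zero]
      intro t _; simp; omega
    have hle : l.countP (fun t => decide (t ≤ b)) ≤ l.countP (fun t => decide (t < a)) :=
      List.countP_mono_left (fun t _ ht => by simp at *; omega)
    rw [h0]; push_cast; omega

-- range(0, b) as a cast of List.range
lemma pyRange_zero_toNat (b : Int) :
    PySem.List.pyRange 0 b 1 = (List.range b.toNat).map (fun k : Nat => ((k : Int))) := by
  rw [PySem.List.pyRange_one, show (b - 0).toNat = b.toNat from by omega]
  exact List.map_congr_left (fun k _ => zero_add (k : Int))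

-- A's inner loop counts, over the zipped prefix, the loss-marked timestamps in [a, b]
lemma inner_eq_countP (ts ms : List Int) (hmt : ms.length ≤ ts.length) (a b : Int) :
    (PySem.List.pyRange 0 ((ms.length : Int)) 1).foldl
      (fun pc j =>
        if PySem.List.pyGetD ts j 0 ≥ a ∧ PySem.List.pyGetD ts j 0 ≤ b then
          if PySem.List.pyGetD ms j 0 = -100 then pc + 1 else pc
        else pc) 0
    = ((ts.zip ms).countP (fun p => p.2 == -100 && (decide (a ≤ p.1) && decide (p.1 ≤ b))) : Int) := by
  have hbody : (fun (pc : Int) (j : Int) =>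
        if PySem.List.pyGetD ts j 0 ≥ a ∧ PySem.List.pyGetD ts j 0 ≤ b then
          if PySem.List.pyGetD ms j 0 = -100 then pc + 1 else pc
        else pc)
      = (fun pc j =>
        if ((PySem.List.pyGetD ms j 0 == -100) &&
            (decide (a ≤ PySem.List.pyGetD ts j 0) && decide (PySem.List.pyGetD ts j 0 ≤ b))) = true
        then pc + 1 else pc) := by
    funext pc j
    by_cases h1 : a ≤ PySem.List.pyGetD ts j 0 <;>
      by_cases h2 : PySem.List.pyGetD ts j 0 ≤ b <;>
        by_cases h3 : PySem.List.pyGetD ms j 0 = -100 <;>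
          simp [h1, h2, h3, ge_iff_le]
  rw [hbody, PySem.List.foldl_count_if]
  have hzl : (ts.zip ms).length = ms.length := by
    rw [List.length_zip]; omega
  rw [pyRange_zero_toNat, List.countP_map, zero_add]
  congr 1
  rw [← countP_range_getD (ts.zip ms) (0, 0)
    (fun p => p.2 == -100 && (decide (a ≤ p.1) && decide (p.1 ≤ b))), hzl]
  rw [show ((ms.length : Int)).toNat = ms.length from by omega]
  apply List.countP_congr
  intro k hk
  rw [List.mem_range] at hk
  have hzk : (ts.zip ms).getD k (0, 0) = (ts.getD k 0, ms.getD k 0) := by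
    rw [List.getD_eq_getElem _ _ (by omega), List.getElem_zip,
      List.getD_eq_getElem _ _ (by omega), List.getD_eq_getElem _ _ (by omega)]
  rw [hzk]
  simp [PySem.List.pyGetD_natCast]

-- ===== VERDICT (by name: the statement is the Claim_ definition above) =====
theorem Handle_seperate_PLR_spec : Claim_equal_Handle_seperate_PLR := by
  intro Delay seperation timestamp _ hpre
  unfold Spec_Handle_seperate_PLR Handle_seperate_PLR Handle_seperate_PLR_alt
  by_cases hlen : seperation.length < 2
  · have hempty : PySem.List.pyRange 0 ((seperation.length : Int) - 1) 1 = [] := by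
      rw [pyRange_zero_toNat]
      have : ((seperation.length : Int) - 1).toNat = 0 := by omega
      rw [this]; simp
    rw [if_pos hlen, hempty]
    simp
  · rw [if_neg hlen]
    have hmt : (Delay.getD 3 []).length ≤ timestamp.length := by
      rcases hpre with h | h
      · omega
      · exact h.2
    rw [PySem.List.foldl_append_singleton_eq_map, List.nil_append,
      pyRange_zero_toNat ((seperation.length : Int) - 1), List.map_map, List.map_map]
    apply List.map_congr_left
    intro k hk
    rw [List.mem_range] at hk
    simp only [Function.comp_def]
    set losses := PySem.List.sorted
      (((timestamp.zip (PySem.List.pyGetD Delay 3 [])).filter (fun p => p.2 == -100)).map Prod.fst)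
      (fun x => x) false with hl
    have hsorted : losses.Pairwise (· ≤ ·) := PySem.List.sorted_pairwise _ _
    have hperm : losses.Perm
        (((timestamp.zip (PySem.List.pyGetD Delay 3 [])).filter (fun p => p.2 == -100)).map Prod.fst) :=
      PySem.List.sorted_perm _ _ _
    rw [show ((k : Int) + 1) = (((k + 1 : Nat)) : Int) from by push_cast; ring]
    rw [PySem.List.pyGetD_natCast, PySem.List.pyGetD_natCast, PySem.List.pyGetD_ofNat' Delay 3 []]
    rw [inner_eq_countP timestamp (Delay.getD 3 []) hmt]
    set a := seperation.getD k 0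
    set b := seperation.getD (k + 1) 0
    rw [pvCountBelow_eq_countP losses b false hsorted,
      pvCountBelow_eq_countP losses a true hsorted]
    have hb : pvBelow b false = (fun t => decide (t ≤ b)) := by funext t; simp [pvBelow]
    have ha : pvBelow a true = (fun t => decide (t < a)) := by funext t; simp [pvBelow]
    rw [hb, ha, max_counts losses a b, hperm.countP_eq, List.countP_map, List.countP_filter,
      PySem.List.pyGetD_ofNat' Delay 3 []]
    apply congrArg
    apply List.countP_congr
    intro p _
    simp only [Function.comp_def]
    constructor <;> intro h <;> simp_all
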